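-- pv_equiv track=rewrite | github.com/joyfulbean/Algorithms | Programmers/Practice_by_category/BruteForce/Level1/test.py | solution
-- ===== SOURCE A (Python) =====
-- def solution(answers):
--     person1 = [1,2,3,4,5]
--     person2 = [2,1,2,3,2,4,2,5]
--     person3 = [3,3,1,1,2,2,4,4,5,5]
--
--     count = [[0,1],[0,2],[0,3]]
--     for i in range(len(answers)):
--         if person1[i%len(person1)] == answers[i]:
--             count[0][0] += 1
--         if person2[i%len(person2)] == answers[i]:
--             count[1][0] += 1
--         if person3[i%len(person3)] == answers[i]:
--             count[2][0] += 1
--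
--     answer = []
--     for c in count:
--         if max(count)[0] == c[0]:
--             answer.append(c[1])
--     return answer
-- ===== SOURCE B (Python) =====
-- def solution(answers):
--     def score(pattern):
--         s, rest = 0, []
--         for a in answers:
--             if not rest:
--                 rest = list(pattern)
--             if a == rest[0]:
--                 s += 1
--             rest = rest[1:]
--         return s
--
--     s1 = score([1, 2, 3, 4, 5])
--     s2 = score([2, 1, 2, 3, 2, 4, 2, 5])
--     s3 = score([3, 3, 1, 1, 2, 2, 4, 4, 5, 5])
--     best = max(s1, s2, s3)
--     return [i for i, s in ((1, s1), (2, s2), (3, s3)) if s == best]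
-- ===== Notes on version B (the rewrite author's own statement) =====
-- stated objective: simpler
-- what changed: One indexed loop updating three counters (with i % len indexing and a lexicographic max over [score,id] pairs) is replaced by three independent passes, each consuming the answers against a manually cycled copy of one pattern, then a plain 3-way max and an id comprehension.
import Mathlib
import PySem

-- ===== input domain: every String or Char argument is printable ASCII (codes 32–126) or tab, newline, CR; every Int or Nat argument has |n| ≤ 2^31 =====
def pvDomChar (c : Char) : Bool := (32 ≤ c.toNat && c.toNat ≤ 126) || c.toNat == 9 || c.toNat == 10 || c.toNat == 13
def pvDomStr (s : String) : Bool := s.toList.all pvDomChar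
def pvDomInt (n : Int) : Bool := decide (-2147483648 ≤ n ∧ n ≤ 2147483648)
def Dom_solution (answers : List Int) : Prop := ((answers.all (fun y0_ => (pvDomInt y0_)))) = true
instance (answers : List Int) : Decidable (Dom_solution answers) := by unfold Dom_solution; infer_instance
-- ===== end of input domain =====

-- B replaces A's single indexed three-counter loop by three independent per-pattern passes; objective: simpler.

-- ===== PORT A =====
-- A's three fixed answer patterns
def pvP1 : List Int := [1, 2, 3, 4, 5]
def pvP2 : List Int := [2, 1, 2, 3, 2, 4, 2, 5]
def pvP3 : List Int := [3, 3, 1, 1, 2, 2, 4, 4, 5, 5]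

-- 'for i in range(len(answers))': structural recursion over answers carrying the index i.
-- person[i % len(person)] is in range, so List.getD is exact (no IndexError possible).
def pvLoopA : List Int → Nat → Int × Int × Int → Int × Int × Int
  | [], _, c => c
  | a :: rest, i, (c1, c2, c3) =>
      pvLoopA rest (i + 1)
        ((if pvP1.getD (i % pvP1.length) 0 = a then c1 + 1 else c1),
         (if pvP2.getD (i % pvP2.length) 0 = a then c2 + 1 else c2),
         (if pvP3.getD (i % pvP3.length) 0 = a then c3 + 1 else c3))

-- Python's max over [score, id] pairs: lexicographic, first maximal kept.
def pvMaxPair : Int × Int → List (Int × Int) → Int × Int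
  | m, [] => m
  | m, c :: rest => pvMaxPair (if m.1 < c.1 ∨ (m.1 = c.1 ∧ m.2 < c.2) then c else m) rest

def solution (answers : List Int) : List Int :=
  let c := pvLoopA answers 0 (0, 0, 0)
  let count : List (Int × Int) := [(c.1, 1), (c.2.1, 2), (c.2.2, 3)]
  count.foldl
    (fun acc x => if (pvMaxPair (c.1, 1) [(c.2.1, 2), (c.2.2, 3)]).1 = x.1 then acc ++ [x.2] else acc)
    []

-- ===== PORT B =====
-- One pass of Source B's score(pattern): walk the answers against the remaining cycled
-- pattern 'rest', refilling it from the full pattern when exhausted.  The patterns at the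
-- three call sites are nonempty literals, so Source B's rest[0] never raises; the [] pattern
-- case is unreachable and returns 0.
def pvScoreB : List Int → List Int → List Int → Int
  | [], _, _ => 0
  | a :: rest, v :: vs, p => (if a = v then 1 else 0) + pvScoreB rest vs p
  | a :: rest, [], p =>
      match p with
      | [] => 0
      | v :: vs => (if a = v then 1 else 0) + pvScoreB rest vs p

def solution_alt (answers : List Int) : List Int :=
  let s1 := pvScoreB answers [1, 2, 3, 4, 5] [1, 2, 3, 4, 5]
  let s2 := pvScoreB answers [2, 1, 2, 3, 2, 4, 2, 5] [2, 1, 2, 3, 2, 4, 2, 5]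
  let s3 := pvScoreB answers [3, 3, 1, 1, 2, 2, 4, 4, 5, 5] [3, 3, 1, 1, 2, 2, 4, 4, 5, 5]
  let best := max s1 (max s2 s3)
  (if s1 = best then [(1 : Int)] else []) ++ (if s2 = best then [2] else []) ++
    (if s3 = best then [3] else [])

-- ===== PRECONDITION & SPEC =====
def Spec_solution (answers : List Int) (out : List Int) : Prop := out = solution_alt answers
instance (answers : List Int) (out : List Int) : Decidable (Spec_solution answers out) := by unfold Spec_solution; infer_instance

-- ===== CLAIM (what is proved, stated in full; the proofs are below) =====
def Claim_equal_solution : Prop := ∀ (answers : List Int), Dom_solution answers → Spec_solution answers (solution answers)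

-- ===== LEMMAS AND PROOFS =====

-- refilling the cycle: scoring with an exhausted rest equals scoring with the full pattern
theorem pvScoreB_refill (xs : List Int) (v : Int) (vs : List Int) :
    pvScoreB xs [] (v :: vs) = pvScoreB xs (v :: vs) (v :: vs) := by
  cases xs <;> simp [pvScoreB]

-- one step of B's scorer, phrased with the modular index A uses
theorem pvScoreB_step (p : List Int) (hp : p ≠ []) (a : Int) (rest : List Int) (k : Nat) :
    pvScoreB (a :: rest) (p.drop (k % p.length)) p
      = (if p.getD (k % p.length) 0 = a then 1 else 0)
        + pvScoreB rest (p.drop ((k + 1) % p.length)) p := by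
  have hn : 0 < p.length := List.length_pos_iff.mpr hp
  have hm : k % p.length < p.length := Nat.mod_lt _ hn
  rw [List.drop_eq_getElem_cons hm]
  have hgetD : p.getD (k % p.length) 0 = p[k % p.length] := List.getD_eq_getElem p 0 hm
  by_cases hend : k % p.length + 1 = p.length
  · have hdrop : p.drop (k % p.length + 1) = [] := List.drop_eq_nil_of_le (by omega)
    have h0 : (k + 1) % p.length = 0 := by
      rw [← Nat.mod_add_mod, hend, Nat.mod_self]
    obtain ⟨v, vs, rfl⟩ : ∃ v vs, p = v :: vs := by
      cases p with | nil => exact absurd rfl hp | cons v vs => exact ⟨v, vs, rfl⟩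
    rw [hdrop, h0]
    simp only [pvScoreB, List.drop_zero, pvScoreB_refill, hgetD]
    congr 1
    by_cases h : a = (v :: vs)[k % (v :: vs).length]
    · rw [if_pos h, if_pos h.symm]
    · rw [if_neg h, if_neg (fun e => h e.symm)]
  · have h1 : (k + 1) % p.length = k % p.length + 1 := by
      rw [← Nat.mod_add_mod, Nat.mod_eq_of_lt (by omega)]
    rw [h1]
    simp only [pvScoreB, hgetD]
    congr 1
    by_cases h : a = p[k % p.length]
    · rw [if_pos h, if_pos h.symm]
    · rw [if_neg h, if_neg (fun e => h e.symm)]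

theorem pvLoopA_eq (answers : List Int) :
    ∀ (k : Nat) (c1 c2 c3 : Int),
      pvLoopA answers k (c1, c2, c3)
        = (c1 + pvScoreB answers (pvP1.drop (k % pvP1.length)) pvP1,
           c2 + pvScoreB answers (pvP2.drop (k % pvP2.length)) pvP2,
           c3 + pvScoreB answers (pvP3.drop (k % pvP3.length)) pvP3) := by
  induction answers with
  | nil => intro k c1 c2 c3; simp [pvLoopA, pvScoreB]
  | cons a rest ih =>
      intro k c1 c2 c3
      rw [pvLoopA, ih (k + 1),
        pvScoreB_step pvP1 (by simp [pvP1]) a rest k,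
        pvScoreB_step pvP2 (by simp [pvP2]) a rest k,
        pvScoreB_step pvP3 (by simp [pvP3]) a rest k]
      refine Prod.ext ?_ (Prod.ext ?_ ?_) <;> simp <;> split_ifs <;> ring

-- A's pair-lexicographic selection agrees with B's plain 3-way max selection
theorem pvSelect_eq (s1 s2 s3 : Int) :
    ([((s1 : Int), (1 : Int)), (s2, 2), (s3, 3)].foldl
      (fun acc x => if (pvMaxPair (s1, 1) [(s2, 2), (s3, 3)]).1 = x.1 then acc ++ [x.2] else acc)
      [])
    = (if s1 = max s1 (max s2 s3) then [(1 : Int)] else []) ++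
        (if s2 = max s1 (max s2 s3) then [2] else []) ++
        (if s3 = max s1 (max s2 s3) then [3] else []) := by
  have hmax : (pvMaxPair (s1, 1) [(s2, 2), (s3, 3)]).1 = max s1 (max s2 s3) := by
    simp only [pvMaxPair]
    split_ifs <;> simp_all [max_def] <;> omega
  have e1 : (s1 = max s1 (max s2 s3)) = (max s1 (max s2 s3) = s1) := propext ⟨Eq.symm, Eq.symm⟩
  have e2 : (s2 = max s1 (max s2 s3)) = (max s1 (max s2 s3) = s2) := propext ⟨Eq.symm, Eq.symm⟩
  have e3 : (s3 = max s1 (max s2 s3)) = (max s1 (max s2 s3) = s3) := propext ⟨Eq.symm, Eq.symm⟩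
  simp only [e1, e2, e3]
  simp only [List.foldl, hmax]
  split_ifs <;> simp

theorem solution_eq_alt (answers : List Int) : solution answers = solution_alt answers := by
  unfold solution solution_alt
  rw [pvLoopA_eq answers 0]
  simp only [Nat.zero_mod, List.drop_zero, zero_add]
  exact pvSelect_eq _ _ _

-- ===== VERDICT (by name: the statement is the Claim_ definition above) =====
theorem solution_spec : Claim_equal_solution := by
  intro answers _
  exact solution_eq_alt answers
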